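-- pv_equiv track=rewrite | github.com/kobeSmallman/Cryptography_proj | src/cryptolab/crypto/dh.py | _small_factors
-- ===== SOURCE A (Python) =====
-- from typing import Any, Dict, List, Tuple
--
-- def _small_factors(n: int, limit: int = 2000) -> List[int]:
--     """
--     Division for small prime factors of n
--     (used to check g) and this doesn't FULLY
--     factor large n but it's practical
--     """
--     factors: List[int] = []
--     x = n
--     d = 2 # start at 2 because we don't want to divide by 1 obviously
--     while d * d <= x and d <= limit:
--         if x % d == 0: # found a factor
--             factors.append(d)
--             while x % d == 0:
--                 x//= d
--         d = 3 if d == 2 else d + 2 # next odd divisor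
--     return factors
-- ===== SOURCE B (Python) =====
-- from typing import List
--
-- def _small_factors(n: int, limit: int = 2000) -> List[int]:
--     """Prime-table variant: precompute the primes up to min(limit, isqrt(n)),
--     then trial-divide n by primes only, stopping once p*p exceeds the
--     remaining cofactor."""
--     if n < 4 or limit < 2:
--         return []
--     # integer square root of n by linear search (n >= 4, so s >= 2)
--     s = 1
--     while (s + 1) * (s + 1) <= n:
--         s += 1
--     bound = min(limit, s)
--     # prime table: trial division against the primes already found
--     primes: List[int] = []
--     for c in range(2, bound + 1):
--         is_prime = True
--         for q in primes:
--             if q * q > c: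
--                 break
--             if c % q == 0:
--                 is_prime = False
--                 break
--         if is_prime:
--             primes.append(c)
--     # divide by primes only
--     factors: List[int] = []
--     x = n
--     for p in primes:
--         if p * p > x:
--             break
--         if x % p == 0:
--             factors.append(p)
--             while x % p == 0:
--                 x //= p
--     return factors
-- ===== Notes on version B (the rewrite author's own statement) =====
-- stated objective: alternative
-- what changed: A trial-divides by 2 and every odd candidate in one while loop; B first builds an explicit table of the primes up to min(limit, isqrt(n)) and then divides the shrinking cofactor by primes only, breaking when p*p exceeds it.
import Mathlib
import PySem

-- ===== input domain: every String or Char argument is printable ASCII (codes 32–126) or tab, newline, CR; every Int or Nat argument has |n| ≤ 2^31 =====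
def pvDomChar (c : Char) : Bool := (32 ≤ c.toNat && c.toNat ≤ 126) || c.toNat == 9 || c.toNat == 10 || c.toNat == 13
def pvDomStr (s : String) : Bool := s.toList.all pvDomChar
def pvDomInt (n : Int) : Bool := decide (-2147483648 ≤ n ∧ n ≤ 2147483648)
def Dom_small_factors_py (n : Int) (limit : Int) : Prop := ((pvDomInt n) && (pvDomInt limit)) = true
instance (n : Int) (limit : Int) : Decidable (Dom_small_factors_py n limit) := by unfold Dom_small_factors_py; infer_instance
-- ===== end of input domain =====

-- B replaces A's single while loop over all odd candidate divisors by a precomputed prime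
-- table up to min(limit, isqrt(n)) followed by prime-only trial division (objective: alternative).
-- While loops are ported with a fuel argument that only totalizes them (always sufficient below).

-- ===== PORT A =====
-- next candidate divisor: `d = 3 if d == 2 else d + 2`
def pvNext (d : Int) : Int := if d = 2 then 3 else d + 2

-- inner `while x % d == 0: x //= d`; the guard 2 ≤ d ∧ 0 < x and the fuel only totalize
-- (they hold whenever A runs this loop)
def pvStripA : ℕ → Int → Int → Int
  | 0, x, _ => x
  | fuel + 1, x, d =>
    if 2 ≤ d ∧ 0 < x ∧ PySem.Int.mod x d = 0 then pvStripA fuel (PySem.Int.floordiv x d) d else x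

-- outer `while d * d <= x and d <= limit`
def pvLoopA : ℕ → Int → Int → Int → List Int
  | 0, _, _, _ => []
  | fuel + 1, x, d, limit =>
    if d * d ≤ x ∧ d ≤ limit then
      if PySem.Int.mod x d = 0 then d :: pvLoopA fuel (pvStripA x.toNat x d) (pvNext d) limit
      else pvLoopA fuel x (pvNext d) limit
    else []

def small_factors_py (n : Int) (limit : Int) : List Int := pvLoopA (limit + 1).toNat n 2 limit

-- ===== PORT B =====
-- `s = 1; while (s+1)*(s+1) <= n: s += 1` (guard 0 < s and fuel only totalize; B calls it with s = 1)
def pvIsqrt : ℕ → Int → Int → Int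
  | 0, _, s => s
  | fuel + 1, n, s => if (s + 1) * (s + 1) ≤ n ∧ 0 < s then pvIsqrt fuel n (s + 1) else s

-- inner `for q in primes: if q*q > c: break; if c % q == 0: is_prime = False; break`
def pvCheck (primes : List Int) (c : Int) : Bool :=
  match primes with
  | [] => true
  | q :: qs =>
    if c < q * q then true
    else if PySem.Int.mod c q = 0 then false
    else pvCheck qs c

-- `for c in range(2, bound+1): … primes.append(c)`
def pvGen (cs : List Int) (primes : List Int) : List Int :=
  match cs with
  | [] => primes
  | c :: rest => if pvCheck primes c then pvGen rest (primes ++ [c]) else pvGen rest primes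

-- inner `while x % p == 0: x //= p` of B (same totalizing guard and fuel as pvStripA)
def pvStripB : ℕ → Int → Int → Int
  | 0, x, _ => x
  | fuel + 1, x, p =>
    if 2 ≤ p ∧ 0 < x ∧ PySem.Int.mod x p = 0 then pvStripB fuel (PySem.Int.floordiv x p) p else x

-- `for p in primes: if p*p > x: break; …`
def pvGo (ps : List Int) (x : Int) : List Int :=
  match ps with
  | [] => []
  | p :: rest =>
    if x < p * p then []
    else if PySem.Int.mod x p = 0 then p :: pvGo rest (pvStripB x.toNat x p)
    else pvGo rest x

def small_factors_py_alt (n : Int) (limit : Int) : List Int :=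
  if n < 4 ∨ limit < 2 then []
  else
    let s := pvIsqrt n.toNat n 1
    let bound := min limit s
    let primes := pvGen (PySem.List.pyRange 2 (bound + 1) 1) []
    pvGo primes n

-- ===== PRECONDITION & SPEC =====
def Spec_small_factors_py (n : Int) (limit : Int) (out : List Int) : Prop := out = small_factors_py_alt n limit
instance (n : Int) (limit : Int) (out : List Int) : Decidable (Spec_small_factors_py n limit out) := by unfold Spec_small_factors_py; infer_instance

-- ===== CLAIM (what is proved, stated in full; the proofs are below) =====
def Claim_equal_small_factors_py : Prop := ∀ (n : Int) (limit : Int), Dom_small_factors_py n limit → Spec_small_factors_py n limit (small_factors_py n limit)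

-- ===== LEMMAS AND PROOFS =====

-- `pvGood c` = c has no divisor in [2, c) (for c ≥ 2 this is primality)
def pvGood (c : Int) : Prop := ∀ k : Int, 2 ≤ k → k < c → ¬ k ∣ c

lemma pvStripB_eq_pvStripA : ∀ (fuel : ℕ) (x d : Int), pvStripB fuel x d = pvStripA fuel x d := by
  intro fuel
  induction fuel with
  | zero => intro x d; rfl
  | succ fuel ih =>
    intro x d
    simp only [pvStripB, pvStripA]
    split
    · exact ih _ _
    · rfl

lemma pvStripA_spec (d : Int) (hd : 2 ≤ d) :
    ∀ (fuel : ℕ) (x : Int), 0 < x → x.toNat ≤ fuel →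
      0 < pvStripA fuel x d ∧ pvStripA fuel x d ∣ x ∧ ¬ d ∣ pvStripA fuel x d := by
  intro fuel
  induction fuel with
  | zero => intro x hx hfuel; omega
  | succ fuel ih =>
    intro x hx hfuel
    by_cases hdvd : PySem.Int.mod x d = 0
    · simp only [pvStripA]
      rw [if_pos ⟨hd, hx, hdvd⟩]
      have hdvd' : d ∣ x := (PySem.Int.mod_eq_zero_iff_dvd x d).mp hdvd
      have hfd : PySem.Int.floordiv x d = x / d := PySem.Int.floordiv_eq_ediv_of_pos (by omega)
      have hdx : d ≤ x := Int.le_of_dvd hx hdvd'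
      have hxd : 0 < x / d := by
        have := Int.le_ediv_iff_mul_le (a := 1) (b := x) (by omega : (0:Int) < d)
        omega
      have hlt : x / d < x := by
        have h2 : 0 ≤ x / d := Int.ediv_nonneg (by omega) (by omega)
        have heq := Int.mul_ediv_add_emod x d
        have hr := Int.emod_nonneg x (by omega : d ≠ 0)
        nlinarith
      obtain ⟨h1, h2, h3⟩ := ih (PySem.Int.floordiv x d) (by rw [hfd]; exact hxd)
        (by rw [hfd]; omega)
      refine ⟨h1, dvd_trans h2 ?_, h3⟩
      rw [hfd]
      exact ⟨d, by rw [mul_comm, Int.mul_ediv_cancel' hdvd']⟩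
    · simp only [pvStripA]
      rw [if_neg (by tauto)]
      exact ⟨hx, dvd_refl x, fun hdd => hdvd ((PySem.Int.mod_eq_zero_iff_dvd x d).mpr hdd)⟩

lemma pvIsqrt_spec (n : Int) :
    ∀ (fuel : ℕ) (s : Int), 1 ≤ s → (n - s).toNat ≤ fuel →
      1 ≤ pvIsqrt fuel n s ∧ n < (pvIsqrt fuel n s + 1) * (pvIsqrt fuel n s + 1) := by
  intro fuel
  induction fuel with
  | zero =>
    intro s hs hfuel
    have hns : n ≤ s := by omega
    simp only [pvIsqrt]
    exact ⟨hs, by nlinarith⟩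
  | succ fuel ih =>
    intro s hs hfuel
    simp only [pvIsqrt]
    split
    · rename_i h
      rcases h with ⟨hle, hpos⟩
      have hsn : s + 1 ≤ n := by nlinarith
      exact ih (s + 1) (by omega) (by omega)
    · rename_i h
      rcases not_and_or.mp h with h' | h'
      · exact ⟨hs, by omega⟩
      · omega

lemma exists_least_divisor (c : Int) (hc : 2 ≤ c) (h : ¬ pvGood c) :
    ∃ k : Int, 2 ≤ k ∧ k < c ∧ k ∣ c ∧ pvGood k ∧ k * k ≤ c ∧
      (∀ j : Int, 2 ≤ j → j ∣ c → k ≤ j) := by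
  unfold pvGood at h
  push_neg at h
  obtain ⟨k, hk2, hkc, hkd⟩ := h
  classical
  have hex : ∃ m : ℕ, 2 ≤ m ∧ (m : Int) ∣ c :=
    ⟨k.toNat, by omega, by rwa [Int.toNat_of_nonneg (by omega)]⟩
  obtain ⟨hm02, hm0d⟩ := Nat.find_spec hex
  have hmin : ∀ j : Int, 2 ≤ j → j ∣ c → ((Nat.find hex : ℕ) : Int) ≤ j := by
    intro j hj2 hjd
    by_contra hlt
    push_neg at hlt
    have hnm := Nat.find_min hex (m := j.toNat) (by omega)
    rw [Int.toNat_of_nonneg (by omega)] at hnm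
    exact hnm ⟨by omega, hjd⟩
  set k0 : Int := ((Nat.find hex : ℕ) : Int) with hk0def
  have hk02 : 2 ≤ k0 := by rw [hk0def]; exact_mod_cast hm02
  have hk0c : k0 < c := by have := hmin k hk2 hkd; omega
  have hGood : pvGood k0 := by
    intro j hj2 hjk hjd
    exact absurd (hmin j hj2 (hjd.trans hm0d)) (by omega)
  have hkk : k0 * k0 ≤ c := by
    obtain ⟨m, hm⟩ := hm0d
    have hc0 : (0:Int) < c := by omega
    have hm1 : 0 < m := by nlinarith
    have hmne1 : m ≠ 1 := by
      intro h1; rw [h1, mul_one] at hm; omega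
    have hmdvd : m ∣ c := ⟨k0, by rw [hm]; ring⟩
    have := hmin m (by omega) hmdvd
    nlinarith
  exact ⟨k0, hk02, hk0c, hm0d, hGood, hkk, hmin⟩

lemma pvCheck_of_good (c : Int) : ∀ L : List Int, (∀ q ∈ L, 2 ≤ q ∧ q < c) → pvGood c →
    pvCheck L c = true := by
  intro L
  induction L with
  | nil => intro _ _; rfl
  | cons q qs ih =>
    intro hq hg
    obtain ⟨hq2, hqc⟩ := hq q (by simp)
    have hnd : ¬ q ∣ c := hg q hq2 hqc
    simp only [pvCheck]
    split_ifs with h1 h2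
    · rfl
    · exact absurd ((PySem.Int.mod_eq_zero_iff_dvd c q).mp h2) hnd
    · exact ih (fun r hr => hq r (by simp [hr])) hg

lemma pvCheck_of_bad (c : Int) : ∀ L : List Int, L.Pairwise (· < ·) → (∀ q ∈ L, 2 ≤ q) →
    ∀ k0 : Int, k0 ∈ L → k0 ∣ c → k0 * k0 ≤ c → (∀ q : Int, 2 ≤ q → q ∣ c → k0 ≤ q) →
    pvCheck L c = false := by
  intro L
  induction L with
  | nil => intro _ _ k0 hk0; simp at hk0
  | cons q qs ih =>
    intro hsort hq2 k0 hmem hdvd hkk hleast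
    have hq2' := hq2 q (by simp)
    simp only [pvCheck]
    rcases List.mem_cons.mp hmem with rfl | hmemt
    · rw [if_neg (not_lt.mpr hkk), if_pos ((PySem.Int.mod_eq_zero_iff_dvd c k0).mpr hdvd)]
    · have hqk : q < k0 := (List.pairwise_cons.mp hsort).1 k0 hmemt
      have hqq : q * q ≤ c := le_trans (by nlinarith) hkk
      rw [if_neg (not_lt.mpr hqq)]
      have hqnd : ¬ q ∣ c := fun hd => absurd (hleast q hq2' hd) (by omega)
      rw [if_neg (fun hm => hqnd ((PySem.Int.mod_eq_zero_iff_dvd c q).mp hm))]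
      exact ih (List.pairwise_cons.mp hsort).2 (fun r hr => hq2 r (by simp [hr])) k0 hmemt hdvd hkk hleast

lemma pvCheck_iff (c : Int) (hc : 2 ≤ c) (L : List Int)
    (hmem : ∀ q, q ∈ L ↔ (2 ≤ q ∧ q < c ∧ pvGood q))
    (hsort : L.Pairwise (· < ·)) :
    pvCheck L c = true ↔ pvGood c := by
  constructor
  · intro ht
    by_contra hbad
    obtain ⟨k0, hk02, hk0c, hk0d, hk0g, hk0kk, hk0least⟩ := exists_least_divisor c hc hbad
    have hk0mem : k0 ∈ L := (hmem k0).mpr ⟨hk02, hk0c, hk0g⟩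
    have hfalse := pvCheck_of_bad c L hsort (fun q hq => ((hmem q).mp hq).1) k0 hk0mem hk0d hk0kk hk0least
    rw [ht] at hfalse
    cases hfalse
  · exact pvCheck_of_good c L (fun q hq => ⟨((hmem q).mp hq).1, ((hmem q).mp hq).2.1⟩)

lemma pvGen_spec (bound : Int) : ∀ (fuel : ℕ) (c : Int) (acc : List Int), 2 ≤ c → c ≤ bound + 1 →
    (bound + 1 - c).toNat = fuel →
    (∀ q, q ∈ acc ↔ (2 ≤ q ∧ q < c ∧ pvGood q)) →
    acc.Pairwise (· < ·) →
    (∀ p, p ∈ pvGen (PySem.List.pyRange c (bound + 1) 1) acc ↔ (2 ≤ p ∧ p ≤ bound ∧ pvGood p)) ∧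
      (pvGen (PySem.List.pyRange c (bound + 1) 1) acc).Pairwise (· < ·) := by
  intro fuel
  induction fuel using Nat.strong_induction_on with
  | _ fuel ih =>
  intro c acc hc2 hcb hfuel hmem hsort
  by_cases hlt : c < bound + 1
  · rw [PySem.List.pyRange_one_cons hlt]
    simp only [pvGen]
    have hchk := pvCheck_iff c hc2 acc hmem hsort
    by_cases hg : pvGood c
    · rw [if_pos (hchk.mpr hg)]
      refine ih (bound + 1 - (c+1)).toNat (by omega) (c+1) (acc ++ [c]) (by omega) (by omega) rfl ?_ ?_
      · intro q
        simp only [List.mem_append, List.mem_singleton, hmem]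
        constructor
        · rintro (⟨h1, h2, h3⟩ | rfl)
          · exact ⟨h1, by omega, h3⟩
          · exact ⟨hc2, by omega, hg⟩
        · rintro ⟨h1, h2, h3⟩
          by_cases hq : q = c
          · right; exact hq
          · left; exact ⟨h1, by omega, h3⟩
      · refine List.pairwise_append.mpr ⟨hsort, List.pairwise_singleton _ _, ?_⟩
        intro a ha b hb
        simp only [List.mem_singleton] at hb
        subst hb
        exact ((hmem a).mp ha).2.1
    · rw [if_neg (fun ht => hg (hchk.mp ht))]
      refine ih (bound + 1 - (c+1)).toNat (by omega) (c+1) acc (by omega) (by omega) rfl ?_ hsort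
      intro q
      rw [hmem q]
      constructor
      · rintro ⟨h1, h2, h3⟩; exact ⟨h1, by omega, h3⟩
      · rintro ⟨h1, h2, h3⟩
        refine ⟨h1, ?_, h3⟩
        rcases lt_or_eq_of_le (by omega : q ≤ c) with h | h
        · exact h
        · exact absurd (h ▸ h3) hg
  · rw [PySem.List.pyRange_one_eq_nil (by omega)]
    simp only [pvGen]
    refine ⟨fun p => ?_, hsort⟩
    rw [hmem p]
    constructor
    · rintro ⟨h1, h2, h3⟩; exact ⟨h1, by omega, h3⟩
    · rintro ⟨h1, h2, h3⟩; exact ⟨h1, by omega, h3⟩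

lemma pvMain (n limit bound : Int) (hn : 4 ≤ n) (hbl : bound ≤ limit)
    (hbound : ∀ d : Int, 2 ≤ d → d ≤ limit → d * d ≤ n → d ≤ bound)
    (P : List Int)
    (hPmem : ∀ p, p ∈ P ↔ (2 ≤ p ∧ p ≤ bound ∧ pvGood p))
    (hPsort : P.Pairwise (· < ·)) :
    ∀ (fuel : ℕ) (d x : Int) (L : List Int), (limit + 1 - d).toNat ≤ fuel →
      (d = 2 ∨ (3 ≤ d ∧ d % 2 = 1)) → 0 < x → x ∣ n →
      (∀ k : Int, 2 ≤ k → k < d → ¬ k ∣ x) →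
      (∀ p, p ∈ L ↔ (d ≤ p ∧ p ∈ P)) → L.Pairwise (· < ·) →
      pvLoopA fuel x d limit = pvGo L x := by
  intro fuel
  induction fuel with
  | zero =>
    intro d x L hfuel hcand hx hxn hinv hLmem hLsort
    have hd2 : 2 ≤ d := by rcases hcand with rfl | ⟨h3, _⟩ <;> omega
    have hdl : limit < d := by omega
    cases L with
    | nil => rfl
    | cons p t =>
      exfalso
      have hpmem := (hLmem p).mp (by simp)
      have hpb := ((hPmem p).mp hpmem.2).2.1
      have := hpmem.1
      omega
  | succ fuel ih =>
    intro d x L hfuel hcand hx hxn hinv hLmem hLsort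
    have hd2 : 2 ≤ d := by rcases hcand with rfl | ⟨h3, _⟩ <;> omega
    simp only [pvLoopA]
    by_cases hguard : d * d ≤ x ∧ d ≤ limit
    · rw [if_pos hguard]
      obtain ⟨hddx, hdlim⟩ := hguard
      have hxle : x ≤ n := Int.le_of_dvd (by omega) hxn
      have hdb : d ≤ bound := hbound d hd2 hdlim (le_trans hddx hxle)
      have hnext_gt : d < pvNext d := by simp only [pvNext]; split <;> omega
      have hnext_cand : pvNext d = 2 ∨ (3 ≤ pvNext d ∧ pvNext d % 2 = 1) := by
        right
        rcases hcand with rfl | ⟨h3, hodd⟩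
        · rw [show pvNext 2 = 3 from rfl]; omega
        · rw [pvNext, if_neg (by omega : ¬ d = 2)]; omega
      have hfuel' : (limit + 1 - pvNext d).toNat ≤ fuel := by omega
      have hskip : ∀ p : Int, pvGood p → 2 ≤ p → d < p → pvNext d ≤ p := by
        intro p hgp hp2 hdp
        rcases hcand with rfl | ⟨h3, hodd⟩
        · rw [show pvNext 2 = 3 from rfl]; omega
        · rw [pvNext, if_neg (by omega : ¬ d = 2)]
          by_contra hlt
          push_neg at hlt
          have h2p : (2:Int) ∣ p := by omega
          exact hgp 2 (by omega) (by omega) h2p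
      have head_eq : ∀ (p : Int) (t : List Int), L = p :: t → d ∈ L → p = d := by
        intro p t hL hdL
        have h1 : d ≤ p := ((hLmem p).mp (by rw [hL]; simp)).1
        rw [hL] at hdL hLsort
        rcases List.mem_cons.mp hdL with h | h
        · omega
        · have := (List.pairwise_cons.mp hLsort).1 d h; omega
      have tail_mem : ∀ t : List Int, L = d :: t → ∀ p, p ∈ t ↔ (pvNext d ≤ p ∧ p ∈ P) := by
        intro t hL p
        constructor
        · intro hpt
          rw [hL] at hLsort hLmem
          have hdp := (List.pairwise_cons.mp hLsort).1 p hpt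
          have hpP := ((hLmem p).mp (by simp [hpt])).2
          have hgp := ((hPmem p).mp hpP).2.2
          have hp2 := ((hPmem p).mp hpP).1
          exact ⟨hskip p hgp hp2 hdp, hpP⟩
        · rintro ⟨hnp, hpP⟩
          rw [hL] at hLmem
          have hpL : p ∈ d :: t := (hLmem p).mpr ⟨by omega, hpP⟩
          rcases List.mem_cons.mp hpL with rfl | h
          · omega
          · exact h
      by_cases hdvd : PySem.Int.mod x d = 0
      · rw [if_pos hdvd]
        have hdx : d ∣ x := (PySem.Int.mod_eq_zero_iff_dvd x d).mp hdvd
        have hgoodd : pvGood d := fun k hk2 hkd hkdd => hinv k hk2 hkd (hkdd.trans hdx)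
        have hdP : d ∈ P := (hPmem d).mpr ⟨hd2, hdb, hgoodd⟩
        have hdL : d ∈ L := (hLmem d).mpr ⟨le_refl d, hdP⟩
        obtain ⟨p, t, hL⟩ : ∃ p t, L = p :: t := by
          cases L with
          | nil => cases hdL
          | cons p t => exact ⟨p, t, rfl⟩
        have hpd : p = d := head_eq p t hL hdL
        rw [hL, hpd]
        simp only [pvGo]
        rw [if_neg (not_lt.mpr hddx), if_pos hdvd]
        obtain ⟨hs1, hs2, hs3⟩ := pvStripA_spec d hd2 x.toNat x hx (le_refl _)
        rw [pvStripB_eq_pvStripA]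
        congr 1
        refine ih (pvNext d) (pvStripA x.toNat x d) t hfuel' hnext_cand hs1
          (hs2.trans hxn) ?_ (tail_mem t (by rw [hL, hpd])) ?_
        · intro k hk2 hkn hkdvd
          by_cases hkd : k < d
          · exact hinv k hk2 hkd (hkdvd.trans hs2)
          · by_cases hkeq : k = d
            · subst hkeq; exact hs3 hkdvd
            · rcases hcand with rfl | ⟨h3, hodd⟩
              · rw [show pvNext 2 = 3 from rfl] at hkn; omega
              · rw [pvNext, if_neg (by omega : ¬ d = 2)] at hkn
                have h2k : (2:Int) ∣ k := by omega
                have h2x : (2:Int) ∣ x := (h2k.trans hkdvd).trans hs2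
                exact hinv 2 (by omega) (by omega) h2x
        · rw [hL] at hLsort
          exact (List.pairwise_cons.mp hLsort).2
      · rw [if_neg hdvd]
        have hndx : ¬ d ∣ x := fun h => hdvd ((PySem.Int.mod_eq_zero_iff_dvd x d).mpr h)
        have hinv' : ∀ k : Int, 2 ≤ k → k < pvNext d → ¬ k ∣ x := by
          intro k hk2 hkn hkdvd
          by_cases hkd : k < d
          · exact hinv k hk2 hkd hkdvd
          · by_cases hkeq : k = d
            · subst hkeq; exact hndx hkdvd
            · rcases hcand with rfl | ⟨h3, hodd⟩
              · rw [show pvNext 2 = 3 from rfl] at hkn; omega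
              · rw [pvNext, if_neg (by omega : ¬ d = 2)] at hkn
                have h2k : (2:Int) ∣ k := by omega
                exact hinv 2 (by omega) (by omega) (h2k.trans hkdvd)
        by_cases hdP : d ∈ P
        · have hdL : d ∈ L := (hLmem d).mpr ⟨le_refl d, hdP⟩
          obtain ⟨p, t, hL⟩ : ∃ p t, L = p :: t := by
            cases L with
            | nil => cases hdL
            | cons p t => exact ⟨p, t, rfl⟩
          have hpd : p = d := head_eq p t hL hdL
          rw [hL, hpd]
          simp only [pvGo]
          rw [if_neg (not_lt.mpr hddx), if_neg hdvd]
          refine ih (pvNext d) x t hfuel' hnext_cand hx hxn hinv'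
            (tail_mem t (by rw [hL, hpd])) ?_
          rw [hL] at hLsort
          exact (List.pairwise_cons.mp hLsort).2
        · refine ih (pvNext d) x L hfuel' hnext_cand hx hxn hinv' ?_ hLsort
          intro p
          rw [hLmem p]
          constructor
          · rintro ⟨hdp, hpP⟩
            have hgp := ((hPmem p).mp hpP).2.2
            have hp2 := ((hPmem p).mp hpP).1
            have hne : d ≠ p := fun h => hdP (h ▸ hpP)
            exact ⟨hskip p hgp hp2 (lt_of_le_of_ne hdp hne), hpP⟩
          · rintro ⟨hnp, hpP⟩
            exact ⟨by omega, hpP⟩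
    · rw [if_neg hguard]
      cases L with
      | nil => rfl
      | cons p t =>
        have hpmem := (hLmem p).mp (by simp)
        have hp2 := ((hPmem p).mp hpmem.2).1
        have hpb := ((hPmem p).mp hpmem.2).2.1
        rcases not_and_or.mp hguard with hgt | hgt
        · push_neg at hgt
          have hdp := hpmem.1
          have hxp : x < p * p := lt_of_lt_of_le hgt (by nlinarith)
          simp only [pvGo]
          rw [if_pos hxp]
        · exfalso
          have := hpmem.1
          omega

-- ===== VERDICT (by name: the statement is the Claim_ definition above) =====
theorem small_factors_py_spec : Claim_equal_small_factors_py := by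
  unfold Claim_equal_small_factors_py Spec_small_factors_py
  intro n limit _
  by_cases hcase : n < 4 ∨ limit < 2
  · show pvLoopA (limit + 1).toNat n 2 limit = small_factors_py_alt n limit
    unfold small_factors_py_alt
    rw [if_pos hcase]
    cases hfc : (limit + 1).toNat with
    | zero => rfl
    | succ f => simp only [pvLoopA]; rw [if_neg (by omega)]
  · push_neg at hcase
    obtain ⟨hn', hlim'⟩ := hcase
    have hn : 4 ≤ n := by omega
    have hlim : 2 ≤ limit := by omega
    show pvLoopA (limit + 1).toNat n 2 limit = small_factors_py_alt n limit
    unfold small_factors_py_alt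
    rw [if_neg (by omega)]
    show pvLoopA (limit + 1).toNat n 2 limit =
      pvGo (pvGen (PySem.List.pyRange 2 (min limit (pvIsqrt n.toNat n 1) + 1) 1) []) n
    obtain ⟨hs1, hs2⟩ := pvIsqrt_spec n n.toNat 1 (by omega) (by omega)
    set s := pvIsqrt n.toNat n 1 with hsdef
    set bound := min limit s with hbdef
    have hb1 : 1 ≤ bound := le_min (by omega) hs1
    have hbl : bound ≤ limit := min_le_left _ _
    have hbound : ∀ d : Int, 2 ≤ d → d ≤ limit → d * d ≤ n → d ≤ bound := by
      intro d hd2 hdl hddn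
      have hds : d ≤ s := by
        by_contra hgt
        push_neg at hgt
        have h1 : (s+1)*(s+1) ≤ d * d := by nlinarith
        omega
      exact le_min hdl hds
    obtain ⟨hPmem, hPsort⟩ := pvGen_spec bound (bound + 1 - 2).toNat 2 [] (by omega) (by omega) rfl
      (by
        intro q
        constructor
        · intro h; cases h
        · rintro ⟨h1, h2, _⟩; omega)
      List.Pairwise.nil
    refine pvMain n limit bound hn hbl hbound _ hPmem hPsort (limit + 1).toNat 2 n _ (by omega)
      (Or.inl rfl) (by omega) dvd_rfl (by intro k hk2 hklt _; omega) ?_ hPsort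
    intro p
    constructor
    · intro h
      exact ⟨((hPmem p).mp h).1, h⟩
    · rintro ⟨_, h⟩
      exact h
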